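-- pv_equiv track=rewrite | github.com/TheDachlatte007/HolocronHub | backend/main.py | _aleca_visible_parts
-- ===== SOURCE A (Python) =====
-- from typing import Any, List, Optional
--
-- _ALECA_PUBLIC_PARTS = {
--     1: "Trades",
--     2: "Platinum",
--     4: "Ducats",
--     8: "Endo",
--     16: "Credits",
--     32: "Account Data",
--     64: "Aya",
--     128: "Relics",
-- }
--
-- def _aleca_visible_parts(mask: Any) -> list[str]:
--     try:
--         value = int(mask or 0)
--     except Exception:
--         value = 0
--     parts: list[str] = []
--     for bit, label in _ALECA_PUBLIC_PARTS.items():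
--         if value & bit:
--             parts.append(label)
--     return parts
-- ===== SOURCE B (Python) =====
-- _ALECA_PUBLIC_PARTS = {
--     1: "Trades",
--     2: "Platinum",
--     4: "Ducats",
--     8: "Endo",
--     16: "Credits",
--     32: "Account Data",
--     64: "Aya",
--     128: "Relics",
-- }
--
-- def _aleca_visible_parts(mask):
--     # Iterate only the set bits of the low byte, lowest first (the dict's
--     # insertion order is ascending bit value, so the output order matches).
--     try:
--         v = int(mask or 0) & 0xFF
--     except Exception:
--         v = 0
--     parts = []
--     while v:
--         lowbit = v & -v
--         label = _ALECA_PUBLIC_PARTS.get(lowbit)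
--         if label is not None:
--             parts.append(label)
--         v -= lowbit
--     return parts
-- ===== Notes on version B (the rewrite author's own statement) =====
-- stated objective: alternative
-- what changed: B masks the value to its low byte and loops over its set bits via lowbit = v & -v, looking each bit's label up in the dict, instead of scanning all eight table entries and testing each against the mask.
import Mathlib
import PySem

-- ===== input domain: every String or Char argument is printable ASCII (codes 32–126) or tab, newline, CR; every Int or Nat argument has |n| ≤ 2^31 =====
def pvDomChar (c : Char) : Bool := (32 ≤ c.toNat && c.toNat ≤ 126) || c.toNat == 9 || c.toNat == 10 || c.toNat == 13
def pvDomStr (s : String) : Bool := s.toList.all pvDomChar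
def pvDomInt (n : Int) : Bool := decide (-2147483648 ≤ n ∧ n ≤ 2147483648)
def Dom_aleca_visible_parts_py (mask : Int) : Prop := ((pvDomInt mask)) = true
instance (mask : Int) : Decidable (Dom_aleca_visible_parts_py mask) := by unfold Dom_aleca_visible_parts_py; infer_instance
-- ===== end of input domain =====

-- B iterates only the set bits of the mask's low byte (lowbit extraction) instead of scanning all eight table entries; alternative decomposition, same cost.


-- ===== PORT A =====
-- _ALECA_PUBLIC_PARTS as an ordered association list (dict in insertion order)
def alecaTable : List (Int × String) :=
  [(1, "Trades"), (2, "Platinum"), (4, "Ducats"), (8, "Endo"),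
   (16, "Credits"), (32, "Account Data"), (64, "Aya"), (128, "Relics")]

def aleca_visible_parts_py (mask : Int) : List String :=
  -- value = int(mask or 0): for an int argument this is mask itself unless mask == 0 (falsy), then 0
  let value : Int := if mask == 0 then 0 else mask
  alecaTable.foldl
    (fun parts bl => if PySem.Int.band value bl.1 ≠ 0 then parts ++ [bl.2] else parts) []

-- ===== PORT B =====
def alecaDict : PySem.Dict Int String := PySem.Dict.ofList alecaTable

-- the `while v:` loop of Source B; v starts in [0, 255] so at most 8 iterations run
-- (the fuel 8 is a totality guard only, never exhausted before v = 0)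
def alecaAltLoop : Nat → Int → List String → List String
  | 0, _, parts => parts
  | fuel + 1, v, parts =>
    if v ≠ 0 then
      let lowbit := PySem.Int.band v (-v)
      let parts' := match PySem.Dict.get? alecaDict lowbit with
        | some label => parts ++ [label]
        | none => parts
      alecaAltLoop fuel (v - lowbit) parts'
    else parts

def aleca_visible_parts_py_alt (mask : Int) : List String :=
  let v : Int := PySem.Int.band (if mask == 0 then 0 else mask) 255
  alecaAltLoop 8 v []

-- ===== PRECONDITION & SPEC =====
def Spec_aleca_visible_parts_py (mask : Int) (out : List String) : Prop := out = aleca_visible_parts_py_alt mask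
instance (mask : Int) (out : List String) : Decidable (Spec_aleca_visible_parts_py mask out) := by unfold Spec_aleca_visible_parts_py; infer_instance

-- ===== CLAIM (what is proved, stated in full; the proofs are below) =====
def Claim_equal_aleca_visible_parts_py : Prop := ∀ (mask : Int), Dom_aleca_visible_parts_py mask → Spec_aleca_visible_parts_py mask (aleca_visible_parts_py mask)

-- ===== LEMMAS AND PROOFS =====

-- `mask or 0` collapses to mask for an int argument
theorem pvValueId (m : Int) : (if m == 0 then (0 : Int) else m) = m := by
  by_cases h : m = 0 <;> simp [h]

-- a number canonically representing mask's behaviour under & with constants < 256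
def pvReduce (mask : Int) : Int :=
  if 0 ≤ mask then ((mask.toNat % 256 : Nat) : Int)
  else -(((-mask - 1).toNat % 256 : Nat) : Int) - 1

theorem pvAndMod256 (m c : Nat) (h : c < 256) : m &&& c = (m % 256) &&& c := by
  apply Nat.eq_of_testBit_eq; intro i
  simp only [Nat.testBit_and, show (256 : Nat) = 2 ^ 8 from rfl, Nat.testBit_mod_two_pow]
  by_cases hi : i < 8
  · simp [hi]
  · have hle : (2 : Nat) ^ 8 ≤ 2 ^ i := Nat.pow_le_pow_right (by norm_num) (by omega)
    have hc : c.testBit i = false := Nat.testBit_eq_false_of_lt (lt_of_lt_of_le h hle)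
    simp [hc]

theorem pvBandReduce (mask c : Int) (h0 : 0 ≤ c) (h1 : c < 256) :
    PySem.Int.band mask c = PySem.Int.band (pvReduce mask) c := by
  have hc : c.toNat < 256 := by omega
  by_cases hm : 0 ≤ mask
  · simp only [PySem.Int.band, pvReduce, hm, h0, if_pos, Int.natCast_nonneg,
      Int.toNat_natCast]
    rw [pvAndMod256 mask.toNat c.toNat hc]
  · have hq : ¬ (0 ≤ -(((-mask - 1).toNat % 256 : Nat) : Int) - 1) := by
      have : (0 : Int) ≤ (((-mask - 1).toNat % 256 : Nat) : Int) := Int.natCast_nonneg _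
      omega
    simp only [PySem.Int.band, pvReduce, hm, hq, h0, if_pos, if_neg,
      not_false_iff]
    have he : (-(-(((-mask - 1).toNat % 256 : Nat) : Int) - 1) - 1).toNat
        = (-mask - 1).toNat % 256 := by omega
    rw [he]
    have : c.toNat &&& (-mask - 1).toNat = c.toNat &&& ((-mask - 1).toNat % 256) := by
      rw [Nat.and_comm, pvAndMod256 _ _ hc, Nat.and_comm]
    rw [this]

theorem pvReduceBounds (mask : Int) : -256 ≤ pvReduce mask ∧ pvReduce mask < 256 := by
  unfold pvReduce; split <;> omega

theorem pvAReduce (mask : Int) :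
    aleca_visible_parts_py mask = aleca_visible_parts_py (pvReduce mask) := by
  simp only [aleca_visible_parts_py, alecaTable, List.foldl, pvValueId]
  rw [pvBandReduce mask 1 (by norm_num) (by norm_num),
      pvBandReduce mask 2 (by norm_num) (by norm_num),
      pvBandReduce mask 4 (by norm_num) (by norm_num),
      pvBandReduce mask 8 (by norm_num) (by norm_num),
      pvBandReduce mask 16 (by norm_num) (by norm_num),
      pvBandReduce mask 32 (by norm_num) (by norm_num),
      pvBandReduce mask 64 (by norm_num) (by norm_num),
      pvBandReduce mask 128 (by norm_num) (by norm_num)]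

theorem pvBReduce (mask : Int) :
    aleca_visible_parts_py_alt mask = aleca_visible_parts_py_alt (pvReduce mask) := by
  simp only [aleca_visible_parts_py_alt, pvValueId]
  rw [pvBandReduce mask 255 (by norm_num) (by norm_num)]

set_option maxRecDepth 10000 in
theorem pvAllSmall : ∀ n : Nat, n < 512 →
    aleca_visible_parts_py ((n : Int) - 256) = aleca_visible_parts_py_alt ((n : Int) - 256) := by
  decide

-- ===== VERDICT (by name: the statement is the Claim_ definition above) =====
theorem aleca_visible_parts_py_spec : Claim_equal_aleca_visible_parts_py := by
  intro mask _
  unfold Spec_aleca_visible_parts_py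
  obtain ⟨hlo, hhi⟩ := pvReduceBounds mask
  have h := pvAllSmall (pvReduce mask + 256).toNat (by omega)
  have e : (((pvReduce mask + 256).toNat : Int)) - 256 = pvReduce mask := by omega
  rw [e] at h
  rw [pvAReduce mask, pvBReduce mask, h]
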